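-- pv_equiv track=rewrite | github.com/gerdabl/python1 | prep_cmd.py | prep_cmd
-- ===== SOURCE A (Python) =====
-- maxlength = 10
--
-- def prep_cmd(id, tx_que, cmd_list):
--
--     s_list = tx_que.split("#")
--
--     for i in s_list:
--         if i != "":
--             cmd_list[int(i[1:2])] = cmd_list[int(i[1:2])] + "#" + i[2:]
--
--     cmd_id_list = cmd_list[id].split("#")
--
--     a = ""
--     b = ""
--
--
--     for i in cmd_id_list:
--         if i != "":
--             a = a + i
--             if len(a) < maxlength:
--              b = a
--             else:
--                 b = b + i
--     cmd_list[id] = b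
--
--     return(b)
-- ===== SOURCE B (Python) =====
-- maxlength = 10
--
-- def prep_cmd(id, tx_que, cmd_list):
--     # One pass over the queue: keep only the payloads addressed to id and join them
--     # after the (hash-stripped) existing entry.  No dict re-distribution, no second
--     # split, no threshold bookkeeping.  Return-value equivalent to A; unlike A, the
--     # other entries of cmd_list are left unmodified (cmd_list[id] is still set).
--     parts = [cmd_list[id].replace("#", "")]
--     for piece in tx_que.split("#"):
--         if piece != "" and int(piece[1:2]) == id:
--             parts.append(piece[2:])
--     b = "".join(parts)
--     cmd_list[id] = b
--     return b
-- ===== Notes on version B (the rewrite author's own statement) =====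
-- stated objective: simpler
-- what changed: Instead of distributing every queue piece into the dict, re-reading cmd_list[id], splitting it again and re-concatenating with a dead maxlength threshold, B makes one pass over tx_que.split('#') collecting only the payloads addressed to id and joins them after cmd_list[id] stripped of '#'; the threshold branch is provably a no-op and the dict round-trip is provably redundant for the return value. A also appends to the other dict entries; B only sets cmd_list[id] (return-value equivalence).
import Mathlib
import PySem

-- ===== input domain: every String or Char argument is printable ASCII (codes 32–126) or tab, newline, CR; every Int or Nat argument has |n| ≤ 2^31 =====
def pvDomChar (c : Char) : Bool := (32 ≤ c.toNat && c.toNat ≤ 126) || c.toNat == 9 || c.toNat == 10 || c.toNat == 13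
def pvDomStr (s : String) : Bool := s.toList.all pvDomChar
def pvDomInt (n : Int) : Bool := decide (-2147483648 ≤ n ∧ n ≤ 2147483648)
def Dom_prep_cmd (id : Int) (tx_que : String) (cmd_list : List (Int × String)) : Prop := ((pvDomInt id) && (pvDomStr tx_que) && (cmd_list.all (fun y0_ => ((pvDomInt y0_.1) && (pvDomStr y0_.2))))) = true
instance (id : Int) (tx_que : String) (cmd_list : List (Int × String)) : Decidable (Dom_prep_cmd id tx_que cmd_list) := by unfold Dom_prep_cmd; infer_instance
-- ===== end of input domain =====

-- B replaces A's dict-distribution round-trip and second split/threshold loop by one pass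
-- collecting the payloads addressed to id (the maxlength branch is provably dead); the
-- theorem is about the RETURN value only — A also appends to the other dict entries, B does not.


def maxlength : Int := 10

-- ===== PORT A =====
-- first loop: cmd_list[int(i[1:2])] = cmd_list[int(i[1:2])] + "#" + i[2:] (dict read via
-- getD; the raising cases — unparsable i[1:2] or missing key — are excluded by Pre_);
-- second loop: the a/b pair with the maxlength threshold.
def prep_cmd (id : Int) (tx_que : String) (cmd_list : List (Int × String)) : String :=
  let d0 : PySem.Dict Int (List Char) := PySem.Dict.ofList (cmd_list.map (fun p => (p.1, p.2.toList)))
  let s_list := PySem.Chars.splitOn tx_que.toList ['#']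
  let d := s_list.foldl
    (fun d i =>
      if i ≠ [] then
        let k := (PySem.Int.ofStr? (String.ofList (PySem.Chars.slice i (some 1) (some 2)))).getD 0
        d.insert k (d.getD k [] ++ ['#'] ++ PySem.Chars.slice i (some 2) none)
      else d) d0
  let cmd_id_list := PySem.Chars.splitOn (d.getD id []) ['#']
  let ab := cmd_id_list.foldl
    (fun (p : List Char × List Char) i =>
      if i ≠ [] then
        let a := p.1 ++ i
        if PySem.Chars.len a < maxlength then (a, a) else (a, p.2 ++ i)
      else p) ([], [])
  String.ofList ab.2

-- ===== PORT B =====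
-- parts = [cmd_list[id].replace('#','')]; one pass appending piece[2:] whenever
-- piece != '' and int(piece[1:2]) == id; return ''.join(parts).
def prep_cmd_alt (id : Int) (tx_que : String) (cmd_list : List (Int × String)) : String :=
  let d0 : PySem.Dict Int (List Char) := PySem.Dict.ofList (cmd_list.map (fun p => (p.1, p.2.toList)))
  let parts0 : List (List Char) := [PySem.Chars.replace (d0.getD id []) ['#'] []]
  let parts := (PySem.Chars.splitOn tx_que.toList ['#']).foldl
    (fun parts piece =>
      if !piece.isEmpty && ((PySem.Int.ofStr? (String.ofList (PySem.Chars.slice piece (some 1) (some 2)))).getD 0 == id)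
      then parts ++ [PySem.Chars.slice piece (some 2) none]
      else parts) parts0
  String.ofList parts.flatten

-- ===== PRECONDITION & SPEC =====
-- Pre_ excludes exactly the inputs on which Python A raises: a non-empty queue piece whose
-- second character does not parse with int() (ValueError) or parses to a key absent from
-- cmd_list, or id absent from cmd_list (KeyError).
def Pre_prep_cmd (id : Int) (tx_que : String) (cmd_list : List (Int × String)) : Prop :=
  (∀ i ∈ PySem.Chars.splitOn tx_que.toList ['#'], i ≠ [] →
      ((PySem.Int.ofStr? (String.ofList (PySem.Chars.slice i (some 1) (some 2)))).elim false
        (fun k => (cmd_list.map Prod.fst).contains k)) = true)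
  ∧ (cmd_list.map Prod.fst).contains id = true
instance (id : Int) (tx_que : String) (cmd_list : List (Int × String)) : Decidable (Pre_prep_cmd id tx_que cmd_list) := by unfold Pre_prep_cmd; infer_instance
def pvWitness_prep_cmd : Int × String × (List (Int × String)) := (0, "a01x", [(0, "c")])
def Spec_prep_cmd (id : Int) (tx_que : String) (cmd_list : List (Int × String)) (out : String) : Prop := out = prep_cmd_alt id tx_que cmd_list
instance (id : Int) (tx_que : String) (cmd_list : List (Int × String)) (out : String) : Decidable (Spec_prep_cmd id tx_que cmd_list out) := by unfold Spec_prep_cmd; infer_instance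

-- ===== CLAIM (what is proved, stated in full; the proofs are below) =====
def Claim_equal_prep_cmd : Prop := ∀ (id : Int) (tx_que : String) (cmd_list : List (Int × String)), Dom_prep_cmd id tx_que cmd_list → Pre_prep_cmd id tx_que cmd_list → Spec_prep_cmd id tx_que cmd_list (prep_cmd id tx_que cmd_list)

-- ===== LEMMAS AND PROOFS =====

-- the '#'-free removal: replace s ['#'] [] is filtering '#' out
theorem replace_go_filter (fuel : Nat) (l acc : List Char) (h : l.length ≤ fuel) :
    PySem.Chars.replace.go ['#'] [] fuel l acc
      = acc.reverse ++ l.filter (fun c => !(c == '#')) := by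
  induction fuel generalizing l acc with
  | zero =>
    cases l with
    | nil => simp [PySem.Chars.replace.go]
    | cons c t => simp at h
  | succ n ih =>
    cases l with
    | nil => simp [PySem.Chars.replace.go]
    | cons c t =>
      simp only [PySem.Chars.replace.go]
      by_cases hc : c = '#'
      · subst hc
        rw [if_pos (by simp [List.isPrefixOf])]
        simp only [List.length_cons, List.length_nil, Nat.zero_add, List.drop_succ_cons,
          List.drop_zero, List.reverse_nil, List.nil_append]
        simp only [List.length_cons] at h
        rw [ih t acc (by omega)]
        simp
      · rw [if_neg (by simp [List.isPrefixOf]; exact fun h' => hc h'.symm)]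
        simp only [List.length_cons] at h
        rw [ih t (c :: acc) (by omega)]
        simp [hc]

theorem replace_filter (s : List Char) :
    PySem.Chars.replace s ['#'] [] = s.filter (fun c => !(c == '#')) := by
  simp [PySem.Chars.replace, replace_go_filter s.length s [] (Nat.le_refl _)]

-- concatenating the pieces of splitOn on '#' is also filtering out '#'
theorem splitOn_go_flatten (fuel : Nat) (l cur : List Char) (acc : List (List Char))
    (h : l.length ≤ fuel) :
    (PySem.Chars.splitOn.go ['#'] fuel l cur acc).flatten
      = acc.reverse.flatten ++ cur.reverse ++ l.filter (fun c => !(c == '#')) := by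
  induction fuel generalizing l cur acc with
  | zero =>
    cases l with
    | nil => simp [PySem.Chars.splitOn.go]
    | cons c t => simp at h
  | succ n ih =>
    cases l with
    | nil => simp [PySem.Chars.splitOn.go]
    | cons c t =>
      simp only [PySem.Chars.splitOn.go]
      by_cases hc : c = '#'
      · subst hc
        rw [if_pos (by simp [List.isPrefixOf])]
        simp only [List.length_cons, List.length_nil, Nat.zero_add, List.drop_succ_cons,
          List.drop_zero]
        simp only [List.length_cons] at h
        rw [ih t [] (cur.reverse :: acc) (by omega)]
        simp
      · rw [if_neg (by simp [List.isPrefixOf]; exact fun h' => hc h'.symm)]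
        simp only [List.length_cons] at h
        rw [ih t (c :: cur) acc (by omega)]
        simp [hc]

theorem splitOn_flatten (s : List Char) :
    (PySem.Chars.splitOn s ['#']).flatten = s.filter (fun c => !(c == '#')) := by
  simpa using splitOn_go_flatten (s.length + 1) s [] [] (by omega)

-- no piece of splitOn on '#' contains '#'
theorem splitOn_go_no_hash (fuel : Nat) (l cur : List Char) (acc : List (List Char))
    (h : l.length ≤ fuel) (hcur : '#' ∉ cur) (hacc : ∀ p ∈ acc, '#' ∉ p) :
    ∀ p ∈ PySem.Chars.splitOn.go ['#'] fuel l cur acc, '#' ∉ p := by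
  induction fuel generalizing l cur acc with
  | zero =>
    cases l with
    | nil =>
      intro p hp
      simp [PySem.Chars.splitOn.go] at hp
      rcases hp with hp | hp
      · exact fun hx => hacc p hp hx
      · subst hp; simpa using hcur
    | cons c t => simp at h
  | succ n ih =>
    cases l with
    | nil =>
      intro p hp
      simp [PySem.Chars.splitOn.go] at hp
      rcases hp with hp | hp
      · exact fun hx => hacc p hp hx
      · subst hp; simpa using hcur
    | cons c t =>
      simp only [PySem.Chars.splitOn.go]
      by_cases hc : c = '#'
      · subst hc
        rw [if_pos (by simp [List.isPrefixOf])]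
        simp only [List.length_cons, List.length_nil, Nat.zero_add, List.drop_succ_cons,
          List.drop_zero]
        simp only [List.length_cons] at h
        refine ih t [] (cur.reverse :: acc) (by omega) (by simp) ?_
        intro p hp
        rcases List.mem_cons.1 hp with hp | hp
        · subst hp; simpa using hcur
        · exact hacc p hp
      · rw [if_neg (by simp [List.isPrefixOf]; exact fun h' => hc h'.symm)]
        simp only [List.length_cons] at h
        exact ih t (c :: cur) acc (by omega)
          (by intro hx; rcases List.mem_cons.1 hx with hx | hx
              · exact hc hx.symm
              · exact hcur hx) hacc

theorem mem_splitOn_no_hash (s : List Char) :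
    ∀ p ∈ PySem.Chars.splitOn s ['#'], '#' ∉ p := by
  simpa [PySem.Chars.splitOn] using
    splitOn_go_no_hash (s.length + 1) s [] [] (by omega) (by simp) (by simp)

-- A's second loop from an equal pair (a, a) stays equal and just concatenates the pieces
theorem loop2_eq (ps : List (List Char)) (a : List Char) :
    ps.foldl
      (fun (p : List Char × List Char) i =>
        if i ≠ [] then
          let a := p.1 ++ i
          if PySem.Chars.len a < maxlength then (a, a) else (a, p.2 ++ i)
        else p) (a, a)
      = (a ++ ps.flatten, a ++ ps.flatten) := by
  induction ps generalizing a with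
  | nil => simp
  | cons i ps ih =>
    by_cases hi : i = []
    · subst hi; simpa using ih a
    · simp only [List.foldl_cons, if_pos (by simpa using hi)]
      by_cases hl : PySem.Chars.len (a ++ i) < maxlength
      · rw [if_pos hl]; simpa using ih (a ++ i)
      · rw [if_neg hl]; simpa using ih (a ++ i)

-- the entry at id after A's distribution loop: original value plus '#'-prefixed payloads
-- of the pieces addressed to id, in order
theorem distr_getD (id : Int) (ps : List (List Char)) (d : PySem.Dict Int (List Char)) :
    (ps.foldl
      (fun d i =>
        if i ≠ [] then
          let k := (PySem.Int.ofStr? (String.ofList (PySem.Chars.slice i (some 1) (some 2)))).getD 0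
          d.insert k (d.getD k [] ++ ['#'] ++ PySem.Chars.slice i (some 2) none)
        else d) d).getD id []
    = d.getD id [] ++
      ((ps.filter (fun i =>
          !i.isEmpty && ((PySem.Int.ofStr? (String.ofList (PySem.Chars.slice i (some 1) (some 2)))).getD 0 == id))).map
        (fun i => '#' :: PySem.Chars.slice i (some 2) none)).flatten := by
  induction ps generalizing d with
  | nil => simp
  | cons i ps ih =>
    simp only [List.foldl_cons, List.filter_cons]
    by_cases hi : i = []
    · subst hi
      rw [if_neg (by simp), ih, if_neg (by simp)]
    · rw [if_pos (by simpa using hi), ih, PySem.Dict.getD_insert]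
      by_cases hk : (PySem.Int.ofStr? (String.ofList (PySem.Chars.slice i (some 1) (some 2)))).getD 0 = id
      · rw [if_pos hk.symm,
            if_pos (by simp only [Bool.and_eq_true, beq_iff_eq]; exact ⟨by simp [hi], hk⟩), hk]
        simp
      · rw [if_neg (fun h => hk h.symm),
            if_neg (by simp only [Bool.and_eq_true, beq_iff_eq, not_and]; exact fun _ => hk)]

-- filtering '#' out of a concatenation of '#'-prefixed '#'-free payloads yields the payloads
theorem filter_flatten_hash (qs : List (List Char)) (h : ∀ q ∈ qs, '#' ∉ q) :
    ((qs.map (fun q => '#' :: q)).flatten).filter (fun c => !(c == '#')) = qs.flatten := by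
  induction qs with
  | nil => simp
  | cons q qs ih =>
    simp only [List.map_cons, List.flatten_cons, List.filter_append, List.filter_cons]
    have hq : ∀ a ∈ q, (!(a == '#')) = true := by
      intro a ha
      have : a ≠ '#' := fun hh => h q (by simp) (hh ▸ ha)
      simpa using this
    rw [List.filter_eq_self.2 hq]
    simp [ih (fun q hq => h q (by simp [hq]))]

-- ===== VERDICT (by name: the statement is the Claim_ definition above) =====
theorem prep_cmd_spec : Claim_equal_prep_cmd := by
  intro id tx_que cmd_list _ _
  simp only [Spec_prep_cmd, prep_cmd, prep_cmd_alt]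
  rw [loop2_eq, splitOn_flatten, distr_getD, replace_filter,
      PySem.List.foldl_append_if, List.filter_append,
      show (fun i => '#' :: PySem.Chars.slice i (some 2) none)
         = ((fun q => ('#' :: q : List Char)) ∘ (fun i => PySem.Chars.slice i (some 2) none)) from rfl,
      ← List.map_map,
      filter_flatten_hash _ (fun q hq => by
        rcases List.mem_map.1 hq with ⟨i, hi, rfl⟩
        have hni : '#' ∉ i := mem_splitOn_no_hash tx_que.toList i (List.mem_filter.1 hi).1
        rw [show PySem.Chars.slice i (some 2) none = i.drop 2 from by simp [pysem]]
        exact fun hx => hni (List.drop_subset _ _ hx))]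
  simp
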